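-- pv_equiv track=rewrite | github.com/tee-lab/patchy-ecosterics | cluster_equivalences.py | get_common_ancestors
-- ===== SOURCE A (Python) =====
-- def get_common_ancestors(relationships):
--     relationships = sorted(relationships, key=lambda x: x[0])
--     ancestries = []
--     for i, relationship in enumerate(relationships):
--         if len(ancestries) and ancestries[-1][0] == relationship[0]:
--             continue
--         else:
--             ancestor = relationship[0]
--             descendents = []
--
--             j = i
--             while relationships[j][0] == ancestor:
--                 descendents.append(relationships[j][1])
--                 j += 1
--                 if j == len(relationships):
--                     break
--
--             ancestries.append([ancestor, descendents])
--
--     return ancestries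
-- ===== SOURCE B (Python) =====
-- def get_common_ancestors(relationships):
--     groups = {}
--     for ancestor, descendent in sorted(relationships, key=lambda x: x[0]):
--         groups[ancestor] = groups.get(ancestor, []) + [descendent]
--     return [[ancestor, descendents] for ancestor, descendents in groups.items()]
-- ===== Notes on version B (the rewrite author's own statement) =====
-- stated objective: simpler
-- what changed: Replaces A's enumerate/while index run-scanning with duplicate-skipping 'continue' by a single dict-grouping pass over the sorted list (insertion order of the dict yields the groups directly).
import Mathlib
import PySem

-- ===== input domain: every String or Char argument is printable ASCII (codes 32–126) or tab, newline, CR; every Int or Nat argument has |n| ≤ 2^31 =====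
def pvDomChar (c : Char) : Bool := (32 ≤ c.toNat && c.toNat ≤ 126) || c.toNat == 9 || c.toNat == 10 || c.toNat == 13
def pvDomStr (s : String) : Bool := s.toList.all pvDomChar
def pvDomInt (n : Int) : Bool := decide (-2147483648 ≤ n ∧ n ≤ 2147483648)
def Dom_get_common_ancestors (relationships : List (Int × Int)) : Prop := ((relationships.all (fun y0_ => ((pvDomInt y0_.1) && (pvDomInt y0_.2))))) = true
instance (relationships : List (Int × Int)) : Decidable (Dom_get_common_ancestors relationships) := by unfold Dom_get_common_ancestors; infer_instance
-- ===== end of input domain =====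

-- B replaces A's enumerate/while index run-scanning over the sorted list by one dict-grouping
-- pass over that same sorted list (objective: simpler). Both programs are total.

-- ===== PORT A =====
-- the inner 'while relationships[j][0] == ancestor: descendents.append(relationships[j][1]); j += 1'
-- scanning the suffix relationships[i:] (the suffix is passed as a list; exact)
def pvWhileRun (ancestor : Int) : List (Int × Int) → List Int
  | [] => []
  | (a, d) :: t => if a = ancestor then d :: pvWhileRun ancestor t else []

-- the outer 'for i, relationship in enumerate(relationships)' loop; the current suffix
-- relationships[i:] is the list argument; 'ancestries[-1][0]' is getLast?
def pvLoopA (ancestries : List (Int × List Int)) : List (Int × Int) → List (Int × List Int)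
  | [] => ancestries
  | (a, d) :: rest =>
    match ancestries.getLast? with
    | some (pa, _) =>
      if pa = a then pvLoopA ancestries rest
      else pvLoopA (ancestries ++ [(a, pvWhileRun a ((a, d) :: rest))]) rest
    | none => pvLoopA (ancestries ++ [(a, pvWhileRun a ((a, d) :: rest))]) rest

def get_common_ancestors (relationships : List (Int × Int)) : List (Int × List Int) :=
  pvLoopA [] (PySem.List.sorted relationships (fun x => x.1) false)

-- ===== PORT B =====
def get_common_ancestors_alt (relationships : List (Int × Int)) : List (Int × List Int) :=
  let groups := (PySem.List.sorted relationships (fun x => x.1) false).foldl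
    (fun d r => d.insert r.1 (d.getD r.1 [] ++ [r.2])) PySem.Dict.empty
  groups.items

-- ===== PRECONDITION & SPEC =====
def Spec_get_common_ancestors (relationships : List (Int × Int)) (out : List (Int × List Int)) : Prop := out = get_common_ancestors_alt relationships
instance (relationships : List (Int × Int)) (out : List (Int × List Int)) : Decidable (Spec_get_common_ancestors relationships out) := by unfold Spec_get_common_ancestors; infer_instance

-- ===== CLAIM (what is proved, stated in full; the proofs are below) =====
def Claim_equal_get_common_ancestors : Prop := ∀ (relationships : List (Int × Int)), Dom_get_common_ancestors relationships → Spec_get_common_ancestors relationships (get_common_ancestors relationships)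

-- ===== LEMMAS AND PROOFS =====

-- canonical grouping of a (sorted) list into runs; both ports are proved equal to it
def pvCanon : List (Int × Int) → List (Int × List Int)
  | [] => []
  | (a, d) :: t =>
    (a, d :: pvWhileRun a t) :: pvCanon (t.dropWhile (fun r => decide (r.1 = a)))
termination_by l => l.length
decreasing_by
  simpa using Nat.lt_succ_of_le (List.length_dropWhile_le _ t)

-- the run collector is map-of-takeWhile
theorem pvWhileRun_eq_takeWhile (a : Int) (t : List (Int × Int)) :
    pvWhileRun a t = (t.takeWhile (fun r => decide (r.1 = a))).map (·.2) := by
  induction t with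
  | nil => rfl
  | cons x t ih =>
    obtain ⟨b, d⟩ := x
    by_cases h : b = a <;> simp [pvWhileRun, List.takeWhile, h, ih]

-- after dropping the run of key a from a key-sorted tail whose keys are all ≥ a,
-- every remaining key differs from a
theorem pvDropWhile_ne (a : Int) (t : List (Int × Int))
    (hp : t.Pairwise (fun x y => x.1 ≤ y.1)) (hge : ∀ r ∈ t, a ≤ r.1) :
    ∀ r ∈ t.dropWhile (fun r => decide (r.1 = a)), r.1 ≠ a := by
  induction t with
  | nil => simp
  | cons x t ih =>
    by_cases h : x.1 = a
    · rw [List.dropWhile_cons_of_pos (by simpa using h)]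
      exact ih hp.of_cons (fun r hr => hge r (List.mem_cons_of_mem _ hr))
    · rw [List.dropWhile_cons_of_neg (by simpa using h)]
      intro r hr
      rcases List.mem_cons.mp hr with rfl | hr
      · exact h
      · have hx : a ≤ x.1 := hge x (List.mem_cons_self)
        have hxr : x.1 ≤ r.1 := (List.pairwise_cons.mp hp).1 r hr
        omega

-- A's loop skips every leading element whose key equals the last recorded ancestor
theorem pvLoopA_skip (a : Int) (acc : List (Int × List Int))
    (hlast : ∃ p, acc.getLast? = some p ∧ p.1 = a) :
    ∀ t : List (Int × Int),
      pvLoopA acc t = pvLoopA acc (t.dropWhile (fun r => decide (r.1 = a))) := by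
  intro t
  induction t with
  | nil => rfl
  | cons x t ih =>
    obtain ⟨b, d⟩ := x
    obtain ⟨⟨pa, pds⟩, hl, hpa⟩ := hlast
    by_cases h : b = a
    · rw [List.dropWhile_cons_of_pos (by simpa using h)]
      rw [← ih]
      simp only [pvLoopA, hl]
      rw [if_pos (show pa = b by simp at hpa; omega)]
    · rw [List.dropWhile_cons_of_neg (by simpa using h)]

-- A's loop over a key-sorted list, started from any accumulator whose last key
-- does not occur among the remaining keys, appends the canonical grouping
theorem pvLoopA_canon (n : Nat) : ∀ s : List (Int × Int), s.length ≤ n →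
    s.Pairwise (fun x y => x.1 ≤ y.1) →
    ∀ acc : List (Int × List Int),
      (acc.getLast? = none ∨ ∃ p, acc.getLast? = some p ∧ ∀ r ∈ s, r.1 ≠ p.1) →
      pvLoopA acc s = acc ++ pvCanon s := by
  induction n with
  | zero =>
    intro s hs _ acc _
    rw [List.length_eq_zero_iff.mp (Nat.le_zero.mp hs)]
    simp [pvLoopA, pvCanon]
  | succ n ih =>
    intro s hs hp acc hacc
    match s with
    | [] => simp [pvLoopA, pvCanon]
    | (a, d) :: t =>
      have hne : ∀ pa pds, acc.getLast? = some (pa, pds) → ¬ pa = a := by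
        intro pa pds hl h
        rcases hacc with h0 | ⟨p, hp', hall⟩
        · simp [h0] at hl
        · rw [hl] at hp'
          obtain rfl : (pa, pds) = p := Option.some.inj hp'
          exact hall (a, d) List.mem_cons_self (by simpa using h.symm)
      have hstep : pvLoopA acc ((a, d) :: t)
          = pvLoopA (acc ++ [(a, pvWhileRun a ((a, d) :: t))]) t := by
        simp only [pvLoopA]
        match hl : acc.getLast? with
        | none => rfl
        | some (pa, pds) => simp [hne pa pds hl]
      rw [hstep]
      have hge : ∀ r ∈ t, a ≤ r.1 := by
        intro r hr; exact (List.pairwise_cons.mp hp).1 r hr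
      rw [pvLoopA_skip a _ ⟨(a, pvWhileRun a ((a, d) :: t)), List.getLast?_concat, rfl⟩ t]
      rw [ih (t.dropWhile (fun r => decide (r.1 = a)))
        (le_trans (List.length_dropWhile_le _ t) (by simpa using Nat.lt_succ_iff.mp (Nat.lt_of_lt_of_le (Nat.lt_succ_of_le (Nat.le_refl _)) hs)))
        (List.Pairwise.sublist (List.dropWhile_sublist _) hp.of_cons)
        _
        (Or.inr ⟨(a, pvWhileRun a ((a, d) :: t)), List.getLast?_concat,
          pvDropWhile_ne a t hp.of_cons hge⟩)]
      have : pvWhileRun a ((a, d) :: t) = d :: pvWhileRun a t := by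
        simp [pvWhileRun]
      rw [this]
      simp [pvCanon]

-- keys of l avoid a: no entry of l has key a
theorem pvNotKey (l : List (Int × List Int)) (a : Int)
    (h : ∀ k ∈ l.map (·.1), k ≠ a) : ∀ p ∈ l, ¬ (p.1 = a) := by
  intro p hp hpa
  exact h p.1 (List.mem_map_of_mem hp) hpa

theorem pvFind_none (l : List (Int × List Int)) (a : Int)
    (h : ∀ k ∈ l.map (·.1), k ≠ a) : l.find? (fun p => p.1 == a) = none := by
  rw [List.find?_eq_none]
  intro p hp hbeq
  exact pvNotKey l a h p hp (by simpa using hbeq)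

-- B's dict step
def pvStep (d : PySem.Dict Int (List Int)) (r : Int × Int) : PySem.Dict Int (List Int) :=
  d.insert r.1 (d.getD r.1 [] ++ [r.2])

-- folding a run of key a onto a dict whose last entry is (a, X) and whose other
-- keys differ from a extends that last entry in place
theorem pvFold_run : ∀ (u : List (Int × Int)) (a : Int), (∀ r ∈ u, r.1 = a) →
    ∀ (l : List (Int × List Int)) (X : List Int), (∀ k ∈ l.map (·.1), k ≠ a) →
      u.foldl pvStep (PySem.Dict.mk (l ++ [(a, X)]))
        = PySem.Dict.mk (l ++ [(a, X ++ u.map (·.2))]) := by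
  intro u
  induction u with
  | nil => intro a _ l X _; simp
  | cons r u ih =>
    intro a hu l X hl
    obtain ⟨b, v⟩ := r
    have hb : b = a := hu (b, v) List.mem_cons_self
    subst hb
    have hcontains : (PySem.Dict.mk (l ++ [(b, X)])).contains b = true := by
      simp [PySem.Dict.contains]
    have hget : (PySem.Dict.mk (l ++ [(b, X)])).getD b [] = X := by
      simp only [PySem.Dict.getD, PySem.Dict.get?]
      rw [List.find?_append, pvFind_none l b hl]
      simp
    have hstep : pvStep (PySem.Dict.mk (l ++ [(b, X)])) (b, v)
        = PySem.Dict.mk (l ++ [(b, X ++ [v])]) := by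
      simp only [pvStep, hget, PySem.Dict.insert, hcontains, if_pos]
      congr 1
      rw [List.map_append]
      congr 1
      · conv_rhs => rw [← List.map_id l]
        refine List.map_congr_left (fun p hp => ?_)
        have hne : ¬ (p.1 = b) := pvNotKey l b hl p hp
        simp [hne]
      · simp
    rw [List.foldl_cons, hstep,
      ih b (fun r hr => hu r (List.mem_cons_of_mem _ hr)) l (X ++ [v]) hl]
    simp

-- B's fold over a key-sorted list, started from a dict none of whose keys occur
-- in the list, appends the canonical grouping to the dict's items
theorem pvFold_canon (n : Nat) : ∀ s : List (Int × Int), s.length ≤ n →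
    s.Pairwise (fun x y => x.1 ≤ y.1) →
    ∀ l : List (Int × List Int), (∀ r ∈ s, r.1 ∉ l.map (·.1)) →
      s.foldl pvStep (PySem.Dict.mk l) = PySem.Dict.mk (l ++ pvCanon s) := by
  induction n with
  | zero =>
    intro s hs _ l _
    rw [List.length_eq_zero_iff.mp (Nat.le_zero.mp hs)]
    simp [pvCanon]
  | succ n ih =>
    intro s hs hp l hl
    match s with
    | [] => simp [pvCanon]
    | (a, d) :: t =>
      have hnotmem : a ∉ l.map (·.1) := hl (a, d) List.mem_cons_self
      have hkeys : ∀ k ∈ l.map (·.1), k ≠ a := fun k hk h => hnotmem (h ▸ hk)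
      have hcontains : (PySem.Dict.mk l).contains a = false := by
        simp only [PySem.Dict.contains, List.any_eq_false]
        intro p hp'
        simpa using pvNotKey l a hkeys p hp'
      have hget : (PySem.Dict.mk l).getD a [] = [] := by
        simp only [PySem.Dict.getD, PySem.Dict.get?]
        rw [pvFind_none l a hkeys]
        rfl
      have hstep : pvStep (PySem.Dict.mk l) (a, d) = PySem.Dict.mk (l ++ [(a, [d])]) := by
        simp [pvStep, hget, PySem.Dict.insert, hcontains]
      have hsplit : t = t.takeWhile (fun r => decide (r.1 = a))
          ++ t.dropWhile (fun r => decide (r.1 = a)) :=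
        (List.takeWhile_append_dropWhile).symm
      rw [List.foldl_cons, hstep]
      conv_lhs => rw [hsplit]
      rw [List.foldl_append]
      rw [pvFold_run (t.takeWhile (fun r => decide (r.1 = a))) a
        (fun r hr => by simpa using List.mem_takeWhile_imp hr) l [d]
        hkeys]
      have hge : ∀ r ∈ t, a ≤ r.1 := fun r hr => (List.pairwise_cons.mp hp).1 r hr
      rw [ih (t.dropWhile (fun r => decide (r.1 = a)))
        (le_trans (List.length_dropWhile_le _ t) (Nat.lt_succ_iff.mp (Nat.lt_of_lt_of_le (Nat.lt_succ_of_le (Nat.le_refl _)) hs)))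
        (List.Pairwise.sublist (List.dropWhile_sublist _) hp.of_cons)
        _
        ?_]
      · rw [← pvWhileRun_eq_takeWhile]
        simp [pvCanon]
      · intro r hr
        have hrt : r ∈ t := (List.dropWhile_sublist _).mem hr
        have h1 : r.1 ∉ l.map (·.1) := hl r (List.mem_cons_of_mem _ hrt)
        have h2 : r.1 ≠ a := pvDropWhile_ne a t hp.of_cons hge r hr
        simp only [List.map_append, List.mem_append]
        rintro (h | h)
        · exact h1 h
        · simp at h; exact h2 h

-- ===== VERDICT (by name: the statement is the Claim_ definition above) =====
theorem get_common_ancestors_spec : Claim_equal_get_common_ancestors := by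
  intro rels _
  unfold Spec_get_common_ancestors get_common_ancestors get_common_ancestors_alt
  set s := PySem.List.sorted rels (fun x => x.1) false with hs
  have hp : s.Pairwise (fun x y => x.1 ≤ y.1) := PySem.List.sorted_pairwise rels (fun x => x.1)
  have hA : pvLoopA [] s = pvCanon s := by
    simpa using pvLoopA_canon s.length s (Nat.le_refl _) hp [] (Or.inl rfl)
  have hB : s.foldl pvStep PySem.Dict.empty = PySem.Dict.mk (pvCanon s) := by
    simpa [PySem.Dict.empty] using
      pvFold_canon s.length s (Nat.le_refl _) hp [] (by simp)
  have hstepeq : (fun (d : PySem.Dict Int (List Int)) (r : Int × Int) =>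
      d.insert r.1 (d.getD r.1 [] ++ [r.2])) = pvStep := rfl
  simp only [hstepeq, hB, hA]
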